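-- pv_equiv track=rewrite | github.com/StephenGenusa/build_mw-zip_command | build_mwzip_command.py | remove_content_type
-- ===== SOURCE A (Python) =====
-- def remove_content_type(content_prefix, page_titles):
--     """
--     Given a content_prefix eg. 'File' remove all elements of the page_titles
--     list that contain 'File:'
--     """
--     i = 0
--     while i < len(page_titles):
--         if page_titles[i].startswith(content_prefix+':'):
--             del page_titles[i]
--         else:
--             i += 1
--     return page_titles
-- ===== SOURCE B (Python) =====
-- def remove_content_type(content_prefix, page_titles):
--     """
--     Given a content_prefix eg. 'File' remove all elements of the page_titles
--     list that contain 'File:'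
--     """
--     prefix = content_prefix + ':'
--     w = 0
--     for r in range(len(page_titles)):
--         if not page_titles[r].startswith(prefix):
--             page_titles[w] = page_titles[r]
--             w += 1
--     del page_titles[w:]
--     return page_titles
-- ===== Notes on version B (the rewrite author's own statement) =====
-- stated objective: faster
-- what changed: Replaces the while-loop that repeatedly deletes from the middle of the list with a single-pass two-pointer in-place compaction (write cursor + one tail truncation), mutating the same list object.
import Mathlib
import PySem

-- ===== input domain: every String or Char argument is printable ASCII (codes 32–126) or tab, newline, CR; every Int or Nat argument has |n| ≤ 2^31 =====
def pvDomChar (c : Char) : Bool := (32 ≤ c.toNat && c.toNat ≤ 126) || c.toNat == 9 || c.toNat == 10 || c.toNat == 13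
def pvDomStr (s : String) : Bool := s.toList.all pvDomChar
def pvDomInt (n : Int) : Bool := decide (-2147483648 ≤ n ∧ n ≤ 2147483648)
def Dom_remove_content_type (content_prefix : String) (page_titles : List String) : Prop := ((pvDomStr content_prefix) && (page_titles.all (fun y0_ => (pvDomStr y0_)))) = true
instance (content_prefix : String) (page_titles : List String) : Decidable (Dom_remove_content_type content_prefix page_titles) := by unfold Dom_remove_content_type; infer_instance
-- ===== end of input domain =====

-- B replaces A's while-loop with repeated mid-list deletion by a one-pass two-pointer
-- in-place compaction (write cursor, one tail truncation); return value proved equal.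
-- A mutates its argument in place; the equivalence proved here is about the RETURN value
-- (the Python B performs the same net mutation of the same list object).

-- ===== PORT A =====
-- while i < len(page_titles): if page_titles[i].startswith(prefix): del page_titles[i] else: i += 1
-- page_titles[i] with 0 ≤ i < len is exact as getD; del page_titles[i] is List.eraseIdx.
def removeA_go (pre : String) (lst : List String) (i : Nat) : List String :=
  if _h : i < lst.length then
    if PySem.Str.startswith (lst.getD i "") pre then
      removeA_go pre (lst.eraseIdx i) i
    else
      removeA_go pre lst (i + 1)
  else lst
termination_by lst.length - i
decreasing_by
  · simp [List.length_eraseIdx, _h]; omega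
  · omega

def remove_content_type (content_prefix : String) (page_titles : List String) : List String :=
  removeA_go (content_prefix ++ ":") page_titles 0

-- ===== PORT B =====
-- for r in range(len(page_titles)): if not startswith: page_titles[w] = page_titles[r]; w += 1
-- then del page_titles[w:] (= take w).
def removeB_step (pre : String) (st : List String × Nat) (r : Nat) : List String × Nat :=
  if PySem.Str.startswith (st.1.getD r "") pre then st
  else (st.1.set st.2 (st.1.getD r ""), st.2 + 1)

def remove_content_type_alt (content_prefix : String) (page_titles : List String) : List String :=
  let pre := content_prefix ++ ":"
  let res := (List.range page_titles.length).foldl (removeB_step pre) (page_titles, 0)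
  res.1.take res.2

-- ===== PRECONDITION & SPEC =====
def Spec_remove_content_type (content_prefix : String) (page_titles : List String) (out : List String) : Prop := out = remove_content_type_alt content_prefix page_titles
instance (content_prefix : String) (page_titles : List String) (out : List String) : Decidable (Spec_remove_content_type content_prefix page_titles out) := by unfold Spec_remove_content_type; infer_instance

-- ===== CLAIM (what is proved, stated in full; the proofs are below) =====
def Claim_equal_remove_content_type : Prop := ∀ (content_prefix : String) (page_titles : List String), Dom_remove_content_type content_prefix page_titles → Spec_remove_content_type content_prefix page_titles (remove_content_type content_prefix page_titles)

-- ===== LEMMAS AND PROOFS =====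

-- A's loop returns the processed prefix plus the filtered remainder.
theorem removeA_go_eq (pre : String) :
    ∀ (lst : List String) (i : Nat),
      removeA_go pre lst i =
        lst.take i ++ (lst.drop i).filter (fun s => ! PySem.Str.startswith s pre) := by
  intro lst i
  induction lst, i using removeA_go.induct pre with
  | case1 lst i h hsw ih =>
    rw [removeA_go]
    simp only [h, hsw, if_pos, dif_pos]
    rw [ih]
    have hgd : lst.getD i "" = lst[i] := by simp [List.getD_eq_getElem?_getD, h]
    rw [hgd] at hsw
    have hle : i ≤ (lst.take i).length := by simp [Nat.le_of_lt h]
    have e1 : ((lst.take i ++ lst.drop (i + 1)).take i) = lst.take i := by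
      rw [List.take_append_of_le_length hle, List.take_take, Nat.min_self]
    have e2 : ((lst.take i ++ lst.drop (i + 1)).drop i) = lst.drop (i + 1) := by
      rw [List.drop_append_of_le_length hle,
        List.drop_of_length_le (by simp [Nat.le_of_lt h]), List.nil_append]
    rw [List.eraseIdx_eq_take_drop_succ, e1, e2, List.drop_eq_getElem_cons h]
    simp only [List.filter_cons, hsw, Bool.not_true, Bool.false_eq_true, if_false]
  | case2 lst i h hsw ih =>
    rw [removeA_go]
    simp only [h, hsw, dif_pos, if_neg, Bool.not_eq_true]
    rw [ih]
    have hgd : lst.getD i "" = lst[i] := by simp [List.getD_eq_getElem?_getD, h]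
    rw [hgd] at hsw
    have hsw' : PySem.Str.startswith lst[i] pre = false := Bool.of_not_eq_true hsw
    rw [List.drop_eq_getElem_cons h]
    simp only [List.filter_cons, hsw', Bool.not_false, if_true]
    have htk : lst.take (i + 1) = lst.take i ++ [lst[i]] := by
      rw [List.take_add_one, List.getElem?_eq_getElem h]
      simp
    rw [htk, List.append_assoc, List.singleton_append]
  | case3 lst i h =>
    rw [removeA_go]
    simp only [h]
    have : lst.length ≤ i := Nat.le_of_not_lt h
    simp [List.take_of_length_le this, List.drop_of_length_le this]

-- B's fold invariant: after processing positions [r, r+k) the kept prefix of the buffer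
-- is the already-kept part plus the filtered remainder.
theorem removeB_inv (pre : String) :
    ∀ (k r : Nat) (l : List String) (w : Nat), w ≤ r → r + k = l.length →
      (((List.range' r k).foldl (removeB_step pre) (l, w)).1.take
        ((List.range' r k).foldl (removeB_step pre) (l, w)).2) =
      l.take w ++ (l.drop r).filter (fun s => ! PySem.Str.startswith s pre) := by
  intro k
  induction k with
  | zero =>
    intro r l w hw hlen
    simp [List.drop_of_length_le (by omega : l.length ≤ r)]
  | succ k ih =>
    intro r l w hw hlen
    have hr : r < l.length := by omega
    have hgd : l.getD r "" = l[r] := by simp [List.getD_eq_getElem?_getD, hr]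
    rw [List.range'_succ, List.foldl_cons]
    by_cases hsw : PySem.Str.startswith l[r] pre
    · have hstep : removeB_step pre (l, w) r = (l, w) := by
        unfold removeB_step
        rw [if_pos (by rw [hgd]; exact hsw)]
      rw [hstep, ih (r + 1) l w (by omega) (by omega)]
      rw [List.drop_eq_getElem_cons hr]
      simp only [List.filter_cons, hsw, Bool.not_true, Bool.false_eq_true, if_false]
    · have hwlt : w < l.length := by omega
      have hstep : removeB_step pre (l, w) r = (l.set w l[r], w + 1) := by
        unfold removeB_step
        rw [hgd, if_neg hsw]
      rw [hstep, ih (r + 1) (l.set w l[r]) (w + 1) (by omega) (by simp; omega)]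
      have hdrop : (l.set w l[r]).drop (r + 1) = l.drop (r + 1) :=
        List.drop_set_of_lt (by omega)
      have htake : (l.set w l[r]).take (w + 1) = l.take w ++ [l[r]] := by
        rw [List.take_add_one, List.take_set_of_le (Nat.le_refl w),
          List.getElem?_set_self hwlt]
        simp
      have hsw' : PySem.Str.startswith l[r] pre = false := Bool.of_not_eq_true hsw
      rw [hdrop, htake, List.drop_eq_getElem_cons hr]
      simp only [List.filter_cons, hsw', Bool.not_false, if_true]
      simp

-- ===== VERDICT (by name: the statement is the Claim_ definition above) =====
theorem remove_content_type_spec : Claim_equal_remove_content_type := by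
  intro content_prefix page_titles _
  unfold Spec_remove_content_type remove_content_type remove_content_type_alt
  rw [removeA_go_eq]
  have := removeB_inv (content_prefix ++ ":") page_titles.length 0 page_titles 0
    (Nat.le_refl 0) (by omega)
  rw [← List.range_eq_range'] at this
  simp only [List.take_zero, List.nil_append, List.drop_zero] at this
  simpa using this.symm
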